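-- pv_equiv track=rewrite | github.com/MuneebUrRehman545/Attendance-proxy-elimination | Attendance proxy elimination/Attendance_proxy_elimination.py | generate_final_attendance
-- ===== SOURCE A (Python) =====
-- def generate_final_attendance(all_detections, total_captures):
--     all_students = set()
--     for detection in all_detections:
--         all_students.update(detection)
--
--     attendance_result = {}
--     for student in all_students:
--         detections = [i for i, capture in enumerate(all_detections) if student in capture]
--         count = len(detections)
--
--         if count >= 6:
--             status = "Present"
--         elif 0 < count < 5:
--             status = "Early Left"
--         elif all(i >= 2 for i in detections):
--             status = "Late Comer"
--         else:
--             status = "Unknown"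
--
--         attendance_result[student] = status
--
--     return attendance_result
-- ===== SOURCE B (Python) =====
-- def generate_final_attendance(all_detections, total_captures):
--     # One pass over all detections: student -> [count, first capture index].
--     stats = {}
--     for i, capture in enumerate(all_detections):
--         for student in dict.fromkeys(capture):
--             if student in stats:
--                 stats[student][0] += 1
--             else:
--                 stats[student] = [1, i]
--     result = {}
--     for student, (count, first) in stats.items():
--         if count >= 6:
--             result[student] = "Present"
--         elif count < 5:
--             result[student] = "Early Left"
--         elif first >= 2:
--             result[student] = "Late Comer"
--         else:
--             result[student] = "Unknown"
--     return result
-- ===== Notes on version B (the rewrite author's own statement) =====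
-- stated objective: faster
-- what changed: Instead of scanning every capture once per student (and re-testing membership), B makes a single pass over the captures building a dict student -> (detection count, first capture index) and derives each status from that pair; 'all indices >= 2' becomes 'first index >= 2'.
import Mathlib
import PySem

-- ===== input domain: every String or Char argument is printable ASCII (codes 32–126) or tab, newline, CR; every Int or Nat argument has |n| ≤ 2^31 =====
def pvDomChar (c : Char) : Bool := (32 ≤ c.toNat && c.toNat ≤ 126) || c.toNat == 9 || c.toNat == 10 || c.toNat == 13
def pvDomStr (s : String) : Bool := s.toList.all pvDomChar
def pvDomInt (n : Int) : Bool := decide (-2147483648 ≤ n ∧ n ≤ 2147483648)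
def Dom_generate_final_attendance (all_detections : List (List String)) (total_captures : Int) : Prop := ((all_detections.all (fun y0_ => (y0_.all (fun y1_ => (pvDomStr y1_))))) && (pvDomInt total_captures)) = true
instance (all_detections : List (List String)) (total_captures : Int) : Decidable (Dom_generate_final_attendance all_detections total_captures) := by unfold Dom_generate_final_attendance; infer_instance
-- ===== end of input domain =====

-- B replaces A's per-student rescans of every capture by one pass building
-- student -> (count, first index); equal return value (dict in first-occurrence order).
-- The Python A iterates a hash set only to build a dict, whose comparison ignores order.

-- ===== PORT A =====
-- status computed for one student, exactly A's per-student loop body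
def aStatus (all_detections : List (List String)) (student : String) : String :=
  let detections := ((PySem.List.enumerate all_detections 0).filter
      (fun p => p.2.contains student)).map (fun p => p.1)
  let count : Int := detections.length
  if count ≥ 6 then "Present"
  else if 0 < count ∧ count < 5 then "Early Left"
  else if detections.all (fun i => decide (i ≥ 2)) then "Late Comer"
  else "Unknown"

def generate_final_attendance (all_detections : List (List String)) (total_captures : Int) : List (String × String) :=
  let all_students : PySem.Set String :=
    all_detections.foldl (fun s detection => PySem.Set.update s detection) PySem.Set.empty
  (all_students.foldl (fun d student => d.insert student (aStatus all_detections student))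
      PySem.Dict.empty).items

-- ===== PORT B =====
-- new stats entry for student seen in capture i: bump count, else (1, i)
def bVal (i : Int) (st : PySem.Dict String (Int × Int)) (student : String) : Int × Int :=
  match st.get? student with
  | some cf => (cf.1 + 1, cf.2)
  | none => (1, i)

-- inner loop: for student in dict.fromkeys(capture)
def bCapture (st : PySem.Dict String (Int × Int)) (p : Int × List String) :
    PySem.Dict String (Int × Int) :=
  (PySem.List.dedup p.2).foldl (fun st student => st.insert student (bVal p.1 st student)) st

def bStatus (cf : Int × Int) : String :=
  if cf.1 ≥ 6 then "Present"
  else if cf.1 < 5 then "Early Left"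
  else if cf.2 ≥ 2 then "Late Comer"
  else "Unknown"

def generate_final_attendance_alt (all_detections : List (List String)) (total_captures : Int) : List (String × String) :=
  let stats : PySem.Dict String (Int × Int) :=
    (PySem.List.enumerate all_detections 0).foldl bCapture PySem.Dict.empty
  (stats.items.foldl (fun r q => r.insert q.1 (bStatus q.2)) PySem.Dict.empty).items

-- ===== PRECONDITION & SPEC =====
def Spec_generate_final_attendance (all_detections : List (List String)) (total_captures : Int) (out : List (String × String)) : Prop := out = generate_final_attendance_alt all_detections total_captures
instance (all_detections : List (List String)) (total_captures : Int) (out : List (String × String)) : Decidable (Spec_generate_final_attendance all_detections total_captures out) := by unfold Spec_generate_final_attendance; infer_instance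

-- ===== CLAIM (what is proved, stated in full; the proofs are below) =====
def Claim_equal_generate_final_attendance : Prop := ∀ (all_detections : List (List String)) (total_captures : Int), Dom_generate_final_attendance all_detections total_captures → Spec_generate_final_attendance all_detections total_captures (generate_final_attendance all_detections total_captures)

-- ===== LEMMAS AND PROOFS =====

-- number of captures containing s, and index of the first one
def cntS (s : String) (L : List (List String)) : Nat := L.countP (fun c => c.contains s)
def fIdx (s : String) (L : List (List String)) : Nat := L.findIdx (fun c => c.contains s)

lemma foldl_update_eq (L : List (List String)) :
    ∀ s : PySem.Set String,
      L.foldl (fun s detection => PySem.Set.update s detection) s = PySem.Set.update s L.flatten := by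
  induction L with
  | nil => intro s; simp [PySem.Set.update_nil]
  | cons c L ih =>
    intro s
    simp [List.foldl_cons, List.flatten_cons, ih, PySem.Set.update_append]

lemma inner_get? (i : Int) (l : List String) :
    ∀ (st : PySem.Dict String (Int × Int)) (s : String), l.Nodup →
      (l.foldl (fun st student => st.insert student (bVal i st student)) st).get? s =
        if s ∈ l then some (bVal i st s) else st.get? s := by
  induction l with
  | nil => intro st s _; simp
  | cons x l ih =>
    intro st s hl
    have hx : x ∉ l := (List.nodup_cons.mp hl).1
    have hl' : l.Nodup := (List.nodup_cons.mp hl).2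
    rw [List.foldl_cons, ih _ s hl']
    by_cases hsx : s = x
    · subst hsx
      have hsl : s ∉ l := hx
      simp [hsl, PySem.Dict.get?_insert_self]
    · have h1 : (st.insert x (bVal i st x)).get? s = st.get? s :=
        PySem.Dict.get?_insert_of_ne _ _ hsx
      have h2 : bVal i (st.insert x (bVal i st x)) s = bVal i st s := by
        simp only [bVal] at h1 ⊢
        rw [h1]
      rw [h1, h2]
      simp [List.mem_cons, hsx]

lemma bCapture_get? (st : PySem.Dict String (Int × Int)) (i : Int) (c : List String) (s : String) :
    (bCapture st (i, c)).get? s =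
      if c.contains s then some (bVal i st s) else st.get? s := by
  rw [bCapture]
  rw [inner_get? i (PySem.List.dedup c) st s (PySem.List.nodup_dedup c)]
  by_cases hcm : s ∈ c
  · simp [hcm]
  · simp [hcm]

lemma stats_get? (L : List (List String)) :
    ∀ (i0 : Int) (st : PySem.Dict String (Int × Int)) (s : String),
      ((PySem.List.enumerate L i0).foldl bCapture st).get? s =
        match st.get? s with
        | some cf => some (cf.1 + (cntS s L : Int), cf.2)
        | none => if cntS s L = 0 then none
                  else some ((cntS s L : Int), i0 + (fIdx s L : Int)) := by
  induction L with
  | nil =>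
    intro i0 st s
    cases h : st.get? s <;> simp [PySem.List.enumerate_nil, cntS, h]
  | cons c L ih =>
    intro i0 st s
    rw [PySem.List.enumerate_cons, List.foldl_cons, ih (i0+1) (bCapture st (i0, c)) s,
        bCapture_get? st i0 c s]
    by_cases hc : c.contains s
    · have hcm : s ∈ c := by simpa using hc
      have hcnt : cntS s (c :: L) = cntS s L + 1 := by simp [cntS, List.countP_cons, hcm]
      have hf : fIdx s (c :: L) = 0 := by simp [fIdx, List.findIdx_cons, hcm]
      rw [if_pos hc, hcnt, hf]
      cases hst : st.get? s with
      | some cf =>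
        simp only [bVal, hst]
        push_cast; ring_nf
      | none =>
        simp only [bVal, hst]
        have hne : cntS s L + 1 ≠ 0 := by omega
        simp only [hne, if_neg hne]
        push_cast; ring_nf
    · have hcm : s ∉ c := by simpa using hc
      have hcnt : cntS s (c :: L) = cntS s L := by simp [cntS, List.countP_cons, hcm]
      have hf : fIdx s (c :: L) = fIdx s L + 1 := by simp [fIdx, List.findIdx_cons, hcm]
      rw [if_neg hc, hcnt, hf]
      cases hst : st.get? s with
      | some cf => simp [hst]
      | none =>
        simp only [hst]
        by_cases h0 : cntS s L = 0
        · simp [h0]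
        · simp only [h0, if_neg h0]
          push_cast; ring_nf

lemma update_dedup (s : PySem.Set String) (l : List String) :
    PySem.Set.update s (PySem.List.dedup l) = PySem.Set.update s l := by
  rw [PySem.Set.update_eq_append_filter, PySem.Set.update_eq_append_filter]
  simp

lemma bCapture_keys (st : PySem.Dict String (Int × Int)) (p : Int × List String) :
    (bCapture st p).keys = PySem.Set.update st.keys p.2 := by
  rw [bCapture, PySem.Dict.keys_foldl_insert, update_dedup]

lemma stats_keys (L : List (List String)) :
    ∀ (i0 : Int) (st : PySem.Dict String (Int × Int)),
      ((PySem.List.enumerate L i0).foldl bCapture st).keys = PySem.Set.update st.keys L.flatten := by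
  induction L with
  | nil => intro i0 st; simp [PySem.List.enumerate_nil, PySem.Set.update_nil]
  | cons c L ih =>
    intro i0 st
    rw [PySem.List.enumerate_cons, List.foldl_cons, ih (i0+1), bCapture_keys,
        List.flatten_cons, PySem.Set.update_append]

lemma det_length (s : String) (L : List (List String)) :
    ∀ (i0 : Int),
      (((PySem.List.enumerate L i0).filter (fun p => p.2.contains s)).map (fun p => p.1)).length
        = cntS s L := by
  induction L with
  | nil => intro i0; simp [PySem.List.enumerate_nil, cntS]
  | cons c L ih =>
    intro i0
    rw [PySem.List.enumerate_cons, List.filter_cons]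
    by_cases hcm : s ∈ c
    · have hc : ((fun p : Int × List String => p.2.contains s) (i0, c)) = true := by simpa using hcm
      rw [if_pos hc, List.map_cons, List.length_cons, ih (i0+1)]
      simp [cntS, List.countP_cons, hcm, Nat.add_comm]
    · have hc : ¬ (((fun p : Int × List String => p.2.contains s) (i0, c)) = true) := by simpa using hcm
      rw [if_neg hc, ih (i0+1)]
      simp [cntS, List.countP_cons, hcm]

lemma det_first_mem (s : String) (L : List (List String)) :
    ∀ (i0 : Int), cntS s L ≠ 0 →
      (i0 + (fIdx s L : Int)) ∈
        ((PySem.List.enumerate L i0).filter (fun p => p.2.contains s)).map (fun p => p.1) := by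
  induction L with
  | nil => intro i0 h; simp [cntS] at h
  | cons c L ih =>
    intro i0 h
    rw [PySem.List.enumerate_cons, List.filter_cons]
    by_cases hcm : s ∈ c
    · have hc : ((fun p : Int × List String => p.2.contains s) (i0, c)) = true := by simpa using hcm
      have hf : fIdx s (c :: L) = 0 := by simp [fIdx, List.findIdx_cons, hcm]
      rw [if_pos hc, hf, List.map_cons]
      simp
    · have hc : ¬ (((fun p : Int × List String => p.2.contains s) (i0, c)) = true) := by simpa using hcm
      have hf : fIdx s (c :: L) = fIdx s L + 1 := by simp [fIdx, List.findIdx_cons, hcm]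
      have hcnt : cntS s (c :: L) = cntS s L := by simp [cntS, List.countP_cons, hcm]
      have h' : cntS s L ≠ 0 := by rw [hcnt] at h; exact h
      rw [if_neg hc, hf]
      have heq : i0 + ((fIdx s L + 1 : Nat) : Int) = (i0 + 1) + (fIdx s L : Int) := by
        push_cast; ring
      rw [heq]
      exact ih (i0+1) h'

lemma det_lower_bound (s : String) (L : List (List String)) :
    ∀ (i0 : Int) (x : Int),
      x ∈ ((PySem.List.enumerate L i0).filter (fun p => p.2.contains s)).map (fun p => p.1) →
      i0 + (fIdx s L : Int) ≤ x := by
  induction L with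
  | nil => intro i0 x hx; simp [PySem.List.enumerate_nil] at hx
  | cons c L ih =>
    intro i0 x hx
    rw [PySem.List.enumerate_cons, List.filter_cons] at hx
    by_cases hcm : s ∈ c
    · have hc : ((fun p : Int × List String => p.2.contains s) (i0, c)) = true := by simpa using hcm
      have hf : fIdx s (c :: L) = 0 := by simp [fIdx, List.findIdx_cons, hcm]
      rw [hf]
      rw [if_pos hc, List.map_cons] at hx
      rcases List.mem_cons.mp hx with h | h
      · simp [h]
      · have := ih (i0+1) x h
        have h0 : (0:Int) ≤ (fIdx s L : Int) := Int.natCast_nonneg _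
        push_cast
        omega
    · have hc : ¬ (((fun p : Int × List String => p.2.contains s) (i0, c)) = true) := by simpa using hcm
      have hf : fIdx s (c :: L) = fIdx s L + 1 := by simp [fIdx, List.findIdx_cons, hcm]
      rw [hf]
      rw [if_neg hc] at hx
      have := ih (i0+1) x hx
      push_cast
      omega

lemma status_eq (L : List (List String)) (s : String) (h : cntS s L ≠ 0) :
    aStatus L s = bStatus ((cntS s L : Int), (fIdx s L : Int)) := by
  unfold aStatus bStatus
  simp only []
  rw [det_length s L 0]
  by_cases h6 : ((cntS s L : Int)) ≥ 6
  · rw [if_pos h6, if_pos h6]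
  · rw [if_neg h6, if_neg h6]
    by_cases h5 : ((cntS s L : Int)) < 5
    · have hpos : (0:Int) < (cntS s L : Int) := by
        have : 0 < cntS s L := Nat.pos_of_ne_zero h
        exact_mod_cast this
      rw [if_pos ⟨hpos, h5⟩, if_pos h5]
    · rw [if_neg (by intro hh; exact h5 hh.2), if_neg h5]
      by_cases h2 : ((fIdx s L : Int)) ≥ 2
      · have hall : (((PySem.List.enumerate L 0).filter (fun p => p.2.contains s)).map
            (fun p => p.1)).all (fun i => decide (i ≥ 2)) = true := by
          rw [List.all_eq_true]
          intro x hx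
          have := det_lower_bound s L 0 x hx
          simp only [decide_eq_true_eq]
          omega
        rw [if_pos hall, if_pos h2]
      · have hnall : ¬ ((((PySem.List.enumerate L 0).filter (fun p => p.2.contains s)).map
            (fun p => p.1)).all (fun i => decide (i ≥ 2)) = true) := by
          rw [List.all_eq_true]
          push_neg
          refine ⟨0 + (fIdx s L : Int), det_first_mem s L 0 h, by simp; omega⟩
        rw [if_neg hnall, if_neg h2]

-- ===== VERDICT (by name: the statement is the Claim_ definition above) =====
theorem generate_final_attendance_spec : Claim_equal_generate_final_attendance := by
  intro L tc _hdom
  unfold Spec_generate_final_attendance generate_final_attendance generate_final_attendance_alt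
  simp only []
  have hSnodup : (PySem.Set.ofList L.flatten).Nodup := PySem.Set.nodup_ofList L.flatten
  rw [foldl_update_eq]
  have hSempty : PySem.Set.update PySem.Set.empty L.flatten = PySem.Set.ofList L.flatten := by
    simp [PySem.Set.update_nil_left, PySem.Set.empty]
  rw [hSempty]
  have hA : ((PySem.Set.ofList L.flatten).foldl
        (fun d student => d.insert student (aStatus L student)) PySem.Dict.empty).items
      = (PySem.Set.ofList L.flatten).map (fun s => (s, aStatus L s)) := by
    have := PySem.Dict.items_foldl_insert_fresh (l := PySem.Set.ofList L.flatten)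
      (k := fun a => a) (v := fun a => aStatus L a) (d := PySem.Dict.empty)
      (by intro a _; simp) (by simpa using hSnodup)
    simpa using this
  rw [hA]
  have hkeys : ((PySem.List.enumerate L 0).foldl bCapture PySem.Dict.empty).keys
      = PySem.Set.ofList L.flatten := by
    rw [stats_keys L 0 PySem.Dict.empty]
    simp [PySem.Set.update_nil_left]
  have hknd : ((PySem.List.enumerate L 0).foldl bCapture PySem.Dict.empty).keys.Nodup := by
    rw [hkeys]; exact hSnodup
  have hitems : ((PySem.List.enumerate L 0).foldl bCapture PySem.Dict.empty).items
      = (PySem.Set.ofList L.flatten).map (fun s =>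
          (s, ((PySem.List.enumerate L 0).foldl bCapture PySem.Dict.empty).getD s (0, 0))) := by
    rw [PySem.Dict.items_eq_map_keys _ hknd (0, 0), hkeys]
  have hgetD : ∀ s ∈ PySem.Set.ofList L.flatten,
      ((PySem.List.enumerate L 0).foldl bCapture PySem.Dict.empty).getD s (0, 0)
        = ((cntS s L : Int), (fIdx s L : Int)) := by
    intro s hs
    have hmem : s ∈ L.flatten := (PySem.Set.mem_ofList _ _).mp hs
    have hcnt : cntS s L ≠ 0 := by
      have hp : 0 < L.countP (fun c => c.contains s) := by
        rw [List.countP_pos_iff]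
        obtain ⟨c, hc, hsc⟩ := List.mem_flatten.mp hmem
        exact ⟨c, hc, by simpa using hsc⟩
      simpa [cntS] using Nat.pos_iff_ne_zero.mp hp
    rw [PySem.Dict.getD_eq_get?_getD, stats_get? L 0 PySem.Dict.empty s]
    simp [PySem.Dict.get?_empty, hcnt]
  have hBnd : ((((PySem.List.enumerate L 0).foldl bCapture PySem.Dict.empty).items).map
      (fun q : String × (Int × Int) => q.1)).Nodup := hknd
  have hB : (((PySem.List.enumerate L 0).foldl bCapture PySem.Dict.empty).items.foldl
        (fun r q => r.insert q.1 (bStatus q.2)) PySem.Dict.empty).items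
      = ((PySem.List.enumerate L 0).foldl bCapture PySem.Dict.empty).items.map
          (fun q => (q.1, bStatus q.2)) := by
    have := PySem.Dict.items_foldl_insert_fresh
      (l := ((PySem.List.enumerate L 0).foldl bCapture PySem.Dict.empty).items)
      (k := fun q : String × (Int × Int) => q.1) (v := fun q => bStatus q.2)
      (d := PySem.Dict.empty) (by intro a _; simp) hBnd
    simpa using this
  rw [hB, hitems, List.map_map]
  apply List.map_congr_left
  intro s hs
  have hcnt : cntS s L ≠ 0 := by
    have hmem : s ∈ L.flatten := (PySem.Set.mem_ofList _ _).mp hs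
    have hp : 0 < L.countP (fun c => c.contains s) := by
      rw [List.countP_pos_iff]
      obtain ⟨c, hc, hsc⟩ := List.mem_flatten.mp hmem
      exact ⟨c, hc, by simpa using hsc⟩
    simpa [cntS] using Nat.pos_iff_ne_zero.mp hp
  simp only [Function.comp]
  rw [hgetD s hs, status_eq L s hcnt]
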